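-- pv_equiv track=rewrite | github.com/Gravitar64/Advent-of-Code-2024 | day22.py | solve
-- ===== SOURCE A (Python) =====
-- import time, re, itertools as itt, collections as coll
--
-- def mix_prune(s):
--   s = (s ^ (s * 64)) % 16777216
--   s = (s ^ (s // 32)) % 16777216
--   return (s ^ (s * 2048)) % 16777216
--
-- def solve(p):
--   part1 = part2 = 0
--   bananas = coll.defaultdict(int)
--
--   for s in p:
--     nums = [s := mix_prune(s) for _ in range(2000)]
--     part1 += nums[-1]
--
--     diffs = [b % 10 - a % 10 for a, b in itt.pairwise(nums)]
--     first_seen_pat = set()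
--     for i in range(len(nums) - 4):
--       pat = tuple(diffs[i:i + 4])
--       if pat in first_seen_pat: continue
--       bananas[pat] += nums[i + 4] % 10
--       first_seen_pat.add(pat)
--
--   part2 = max(bananas.values())
--
--   return part1, part2
-- ===== SOURCE B (Python) =====
-- import collections
--
--
-- def mix_prune(s):
--   s = (s ^ (s * 64)) % 16777216
--   s = (s ^ (s // 32)) % 16777216
--   return (s ^ (s * 2048)) % 16777216
--
--
-- def solve(p):
--   part1 = 0
--   bananas = collections.Counter()
--   for s in p:
--     cur = s
--     prev = 0
--     window = collections.deque(maxlen=4)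
--     local = {}
--     for i in range(2000):
--       cur = mix_prune(cur)
--       price = cur % 10
--       if i:
--         window.append(price - prev)
--       if i >= 4:
--         local.setdefault(tuple(window), price)
--       prev = price
--     part1 += cur
--     bananas.update(local)
--   return part1, max(bananas.values())
-- ===== Notes on version B (the rewrite author's own statement) =====
-- stated objective: alternative
-- what changed: Per buyer, B replaces A's materialised 2000-element secrets list, index-sliced diffs list and global seen-set with a single streaming pass keeping only the current secret, previous price and a 4-element rolling deque of diffs, recording first-seen patterns in a per-buyer dict via setdefault and merging it into a global Counter afterwards.
import Mathlib
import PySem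

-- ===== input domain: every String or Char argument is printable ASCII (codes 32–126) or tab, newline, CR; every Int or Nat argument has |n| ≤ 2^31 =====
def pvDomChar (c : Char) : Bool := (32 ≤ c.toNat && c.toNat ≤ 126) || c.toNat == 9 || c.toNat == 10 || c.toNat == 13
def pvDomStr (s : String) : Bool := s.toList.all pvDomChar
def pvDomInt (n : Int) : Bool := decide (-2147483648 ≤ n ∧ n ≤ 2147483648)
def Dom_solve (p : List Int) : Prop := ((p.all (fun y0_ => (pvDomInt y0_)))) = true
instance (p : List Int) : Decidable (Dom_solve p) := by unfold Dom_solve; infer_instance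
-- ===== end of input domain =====

-- B is an alternative decomposition: one streaming pass per buyer (rolling 4-diff window,
-- per-buyer first-seen dict merged into a global counter) instead of A's materialised
-- secrets/diffs lists with index slicing and a global seen-set; same cost, same results.

-- ===== PORT A =====
def mixPrune (s : Int) : Int :=
  let s1 := PySem.Int.mod (PySem.Int.bxor s (s * 64)) 16777216
  let s2 := PySem.Int.mod (PySem.Int.bxor s1 (PySem.Int.floordiv s1 32)) 16777216
  PySem.Int.mod (PySem.Int.bxor s2 (s2 * 2048)) 16777216

def solve (p : List Int) : Int × Int :=
  let st := p.foldl (fun (st : Int × PySem.Dict (List Int) Int) s0 =>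
    let pr := (List.range 2000).foldl (fun (acc : List Int × Int) _ =>
        let s' := mixPrune acc.2
        (acc.1 ++ [s'], s')) ([], s0)
    let nums := pr.1
    let part1 := st.1 + PySem.List.pyGetD nums (-1) 0
    let diffs := (nums.zip nums.tail).map
        (fun ab => PySem.Int.mod ab.2 10 - PySem.Int.mod ab.1 10)
    let inner := (PySem.List.pyRange 0 ((nums.length : Int) - 4) 1).foldl
      (fun (bs : PySem.Dict (List Int) Int × PySem.Set (List Int)) i =>
        let pat := PySem.List.slice diffs (some i) (some (i + 4))
        if PySem.Set.contains bs.2 pat then bs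
        else (bs.1.modify pat 0 (· + PySem.Int.mod (PySem.List.pyGetD nums (i + 4) 0) 10),
              PySem.Set.add bs.2 pat))
      (st.2, PySem.Set.empty)
    (part1, inner.1)) (0, PySem.Dict.empty)
  (st.1, (PySem.List.max? st.2.values (fun x => x)).getD 0)

-- ===== PORT B =====
-- deque(maxlen=4).append: drop the oldest element once four are held (exact for this use)
def pushWin (w : List Int) (d : Int) : List Int :=
  let w' := w ++ [d]
  if 4 < w'.length then w'.tail else w'

def solve_alt (p : List Int) : Int × Int :=
  let st := p.foldl (fun (st : Int × PySem.Dict (List Int) Int) s0 =>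
    let r := (PySem.List.pyRange 0 2000 1).foldl
      (fun (q : Int × Int × List Int × PySem.Dict (List Int) Int) i =>
        let cur := mixPrune q.1
        let price := PySem.Int.mod cur 10
        let window := if i ≠ 0 then pushWin q.2.2.1 (price - q.2.1) else q.2.2.1
        let lcl := if 4 ≤ i then q.2.2.2.setdefault window price else q.2.2.2
        (cur, price, window, lcl))
      (s0, 0, [], PySem.Dict.empty)
    let part1 := st.1 + r.1
    let bananas := r.2.2.2.items.foldl (fun d kv => d.modify kv.1 0 (· + kv.2)) st.2
    (part1, bananas)) (0, PySem.Dict.empty)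
  (st.1, (PySem.List.max? st.2.values (fun x => x)).getD 0)

-- ===== PRECONDITION & SPEC =====
-- Pre_ excludes only the empty list, on which both Pythons raise ValueError (max of no values).
def Pre_solve (p : List Int) : Prop := p ≠ []
instance (p : List Int) : Decidable (Pre_solve p) := by unfold Pre_solve; infer_instance
def pvWitness_solve : List Int := [1]

def Spec_solve (p : List Int) (out : Int × Int) : Prop := out = solve_alt p
instance (p : List Int) (out : Int × Int) : Decidable (Spec_solve p out) := by unfold Spec_solve; infer_instance

-- ===== CLAIM (what is proved, stated in full; the proofs are below) =====
def Claim_equal_solve : Prop := ∀ (p : List Int), Dom_solve p → Pre_solve p → Spec_solve p (solve p)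

-- ===== LEMMAS AND PROOFS =====

def iterMP : Nat → Int → Int
  | 0, s => s
  | n + 1, s => mixPrune (iterMP n s)

def numsL (n : Nat) (s : Int) : List Int := (List.range n).map (fun k => iterMP (k + 1) s)
def priceF (s : Int) (k : Nat) : Int := PySem.Int.mod (iterMP (k + 1) s) 10
def diffF (s : Int) (k : Nat) : Int := priceF s (k + 1) - priceF s k
def patF (s : Int) (i : Nat) : List Int := [diffF s i, diffF s (i + 1), diffF s (i + 2), diffF s (i + 3)]
def seqF (s : Int) (n : Nat) : List (List Int × Int) :=
  (List.range (n - 4)).map (fun i => (patF s i, priceF s (i + 4)))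

def fsFilter : List (List Int × Int) → PySem.Set (List Int) → List (List Int × Int)
  | [], _ => []
  | pv :: t, seen =>
      if PySem.Set.contains seen pv.1 then fsFilter t seen
      else pv :: fsFilter t (PySem.Set.add seen pv.1)

-- A's generator loop
lemma genA (n : Nat) (s : Int) :
    (List.range n).foldl (fun (acc : List Int × Int) _ =>
        let s' := mixPrune acc.2
        (acc.1 ++ [s'], s')) ([], s) = (numsL n s, iterMP n s) := by
  induction n with
  | zero => simp [numsL, iterMP]
  | succ m ih =>
    rw [List.range_succ, List.foldl_append, ih]
    simp [numsL, List.range_succ, iterMP]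

-- last element
lemma lastA (n : Nat) (s : Int) (h : 1 ≤ n) :
    PySem.List.pyGetD (numsL n s) (-1) 0 = iterMP n s := by
  obtain ⟨m, rfl⟩ : ∃ m, n = m + 1 := ⟨n - 1, by omega⟩
  have : numsL (m + 1) s = numsL m s ++ [iterMP (m + 1) s] := by
    simp [numsL, List.range_succ]
  rw [this, PySem.List.pyGetD_neg_one_append_singleton]

-- drop-take of a range-map
lemma dropTake (h : Nat → Int) (m i j : Nat) (hij : i + j ≤ m) :
    (((List.range m).map h).drop i).take j = (List.range j).map (fun k => h (i + k)) := by
  apply List.ext_getElem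
  · simp; omega
  · intro k hk1 hk2
    simp

-- zip-with-tail of a range-map
lemma zipTail {β : Type} (h : Nat → Int) (m : Nat) (g : Int × Int → β) :
    ((((List.range m).map h).zip ((List.range m).map h).tail).map g)
      = (List.range (m - 1)).map (fun k => g (h k, h (k + 1))) := by
  apply List.ext_getElem
  · simp
  · intro k hk1 hk2
    simp

-- A's slice diffs[i:i+4] on the diff stream
lemma patSlice (s : Int) (m i : Nat) (hi : i + 4 ≤ m) :
    PySem.List.slice ((List.range m).map (diffF s)) (some (i : Int)) (some ((i : Int) + 4))
      = patF s i := by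
  have h4 : ((i : Int) + 4) = ((i + 4 : Nat) : Int) := by push_cast; ring
  rw [h4, PySem.List.slice_toNat _ (by positivity) (by positivity)]
  simp only [Int.toNat_natCast]
  have : (i + 4) - i = 4 := by omega
  rw [this, dropTake (diffF s) m i 4 hi]
  simp [patF, List.range_succ]

lemma numsAt (s : Int) (n i : Nat) (hi : i + 4 < n) :
    PySem.Int.mod (PySem.List.pyGetD ((List.range n).map (fun k => iterMP (k + 1) s))
      ((i : Int) + 4) 0) 10 = priceF s (i + 4) := by
  have h4 : ((i : Int) + 4) = ((i + 4 : Nat) : Int) := by push_cast; ring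
  rw [h4, PySem.List.pyGetD_natCast]
  simp [List.getD_eq_getElem?_getD, List.getElem?_map, priceF,
        List.getElem?_range hi]

-- the add-if-new step of A's inner loop, as a function of the (pattern, price) event
def addStep (bs : PySem.Dict (List Int) Int × PySem.Set (List Int)) (pv : List Int × Int) :
    PySem.Dict (List Int) Int × PySem.Set (List Int) :=
  if PySem.Set.contains bs.2 pv.1 then bs
  else (bs.1.modify pv.1 0 (· + pv.2), PySem.Set.add bs.2 pv.1)

-- A's interleaved first-seen loop = fold of the first-occurrence filter
lemma lemA (seq : List (List Int × Int)) (d : PySem.Dict (List Int) Int)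
    (seen : PySem.Set (List Int)) :
    (seq.foldl addStep (d, seen)).1
      = (fsFilter seq seen).foldl (fun d kv => d.modify kv.1 0 (· + kv.2)) d := by
  induction seq generalizing d seen with
  | nil => simp [fsFilter]
  | cons pv t ih =>
    by_cases hm : pv.1 ∈ seen
    · simp [fsFilter, addStep, hm, ih]
    · simp [fsFilter, addStep, hm, ih]

-- B's setdefault loop collects exactly the first occurrences, appended to the items
lemma lemB (seq : List (List Int × Int)) (loc : PySem.Dict (List Int) Int)
    (hnd : loc.keys.Nodup) :
    (seq.foldl (fun l (pv : List Int × Int) => l.setdefault pv.1 pv.2) loc).items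
      = loc.items ++ fsFilter seq loc.keys := by
  induction seq generalizing loc with
  | nil => simp [fsFilter]
  | cons pv t ih =>
    by_cases hm : pv.1 ∈ loc.keys
    · have hc : loc.contains pv.1 = true := (PySem.Dict.contains_iff_mem_keys _ _).2 hm
      have hs : PySem.Set.contains loc.keys pv.1 = true := (PySem.Set.contains_iff _ _).2 hm
      simp only [List.foldl_cons, PySem.Dict.setdefault_of_contains _ _ hc, fsFilter, hs,
        if_true, ih loc hnd]
    · have hc : loc.contains pv.1 = false := by
        rw [← Bool.not_eq_true, PySem.Dict.contains_iff_mem_keys]; exact hm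
      have hs : PySem.Set.contains loc.keys pv.1 = false := by
        rw [← Bool.not_eq_true, PySem.Set.contains_iff]; exact hm
      have hins := PySem.Dict.setdefault_of_not_contains loc pv.2 hc
      have hkeys : (loc.insert pv.1 pv.2).keys = loc.keys ++ [pv.1] :=
        PySem.Dict.keys_insert_of_not_contains loc pv.2 hc
      have hnd' : (loc.insert pv.1 pv.2).keys.Nodup := by
        rw [hkeys]
        simp [List.nodup_append, hnd]
        exact fun a ha h => hm (h ▸ ha)
      simp only [List.foldl_cons, hins, ih _ hnd',
        PySem.Dict.items_insert_of_not_contains loc pv.2 hc, hkeys, fsFilter, hs]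
      have hadd : PySem.Set.add loc.keys pv.1 = loc.keys ++ [pv.1] :=
        PySem.Set.add_of_not_mem hm
      rw [← hadd]
      simp [List.append_assoc]

lemma pushWin_eq (w : List Int) (d : Int) (hw : w.length ≤ 4) :
    pushWin w d = (w ++ [d]).drop (w.length + 1 - 4) := by
  unfold pushWin
  by_cases h : 4 < (w ++ [d]).length
  · simp only [h, if_true]
    have : w.length + 1 - 4 = 1 := by simp at h; omega
    rw [this, List.drop_one]
  · simp only [h, if_false]
    have : w.length + 1 - 4 = 0 := by simp at h; omega
    rw [this, List.drop_zero]

-- streaming window and local dict after n iterations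
def winN (s : Int) (n : Nat) : List Int := ((List.range (n - 1)).map (diffF s)).drop (n - 1 - 4)
def locN (s : Int) (n : Nat) : PySem.Dict (List Int) Int :=
  (seqF s n).foldl (fun l (pv : List Int × Int) => l.setdefault pv.1 pv.2) PySem.Dict.empty

lemma winN_len (s : Int) (n : Nat) : (winN s n).length = n - 1 - (n - 1 - 4) := by
  simp [winN]

lemma winN_pat (s : Int) (n : Nat) (hn : 5 ≤ n) : winN s n = patF s (n - 5) := by
  unfold winN
  have hlen : (((List.range (n - 1)).map (diffF s)).drop (n - 1 - 4)).length = 4 := by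
    simp; omega
  rw [← List.take_of_length_le (le_of_eq hlen)]
  have h5 : n - 1 - 4 = n - 5 := by omega
  rw [h5, dropTake (diffF s) (n - 1) (n - 5) 4 (by omega)]
  simp [patF, List.range_succ]

lemma winN_push (s : Int) (n : Nat) (hn : 1 ≤ n) :
    pushWin (winN s n) (diffF s (n - 1)) = winN s (n + 1) := by
  rw [pushWin_eq _ _ (by rw [winN_len]; omega)]
  unfold winN
  have hr : List.range n = List.range (n - 1) ++ [n - 1] := by
    conv_lhs => rw [show n = (n - 1) + 1 by omega, List.range_succ]
  rw [show n + 1 - 1 = n from rfl, hr, List.map_append, List.map_singleton]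
  rw [List.drop_append_of_le_length
    (by simp only [List.length_drop, List.length_map, List.length_range]; omega)]
  rw [List.drop_append_of_le_length (by simp only [List.length_map, List.length_range]; omega)]
  rw [List.drop_drop]
  congr 2
  simp only [List.length_drop, List.length_map, List.length_range]
  omega

-- the streaming invariant
lemma Binv (s : Int) (n : Nat) :
    (PySem.List.pyRange 0 (n : Int) 1).foldl
      (fun (q : Int × Int × List Int × PySem.Dict (List Int) Int) i =>
        let cur := mixPrune q.1
        let price := PySem.Int.mod cur 10
        let window := if i ≠ 0 then pushWin q.2.2.1 (price - q.2.1) else q.2.2.1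
        let lcl := if 4 ≤ i then q.2.2.2.setdefault window price else q.2.2.2
        (cur, price, window, lcl))
      (s, 0, [], PySem.Dict.empty)
    = (iterMP n s, (if n = 0 then 0 else priceF s (n - 1)), winN s n, locN s n) := by
  induction n with
  | zero =>
    simp [iterMP, winN, locN, seqF, PySem.List.pyRange_one_eq_nil]
  | succ m ih =>
    rw [show ((m + 1 : Nat) : Int) = (m : Int) + 1 by push_cast; ring,
      PySem.List.pyRange_one_succ_right (by positivity), List.foldl_append, ih]
    simp only [List.foldl_cons, List.foldl_nil]
    have hcur : mixPrune (iterMP m s) = iterMP (m + 1) s := rfl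
    have hprice : PySem.Int.mod (iterMP (m + 1) s) 10 = priceF s m := rfl
    have hwin : (if (m : Int) ≠ 0 then
          pushWin (winN s m) (PySem.Int.mod (mixPrune (iterMP m s)) 10 -
            (if m = 0 then 0 else priceF s (m - 1)))
        else winN s m) = winN s (m + 1) := by
      by_cases hm : m = 0
      · subst hm
        simp [winN]
      · have h1 : 1 ≤ m := by omega
        rw [if_pos (by exact_mod_cast hm), if_neg hm, hcur, hprice]
        have : priceF s m - priceF s (m - 1) = diffF s (m - 1) := by
          unfold diffF
          rw [show m - 1 + 1 = m by omega]
        rw [this, winN_push s m h1]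
    rw [hwin]
    have hloc : (if (4 : Int) ≤ (m : Int) then
          (locN s m).setdefault (winN s (m + 1)) (PySem.Int.mod (mixPrune (iterMP m s)) 10)
        else locN s m) = locN s (m + 1) := by
      by_cases hm : 4 ≤ m
      · rw [if_pos (by exact_mod_cast hm), hcur, hprice]
        have hpat : winN s (m + 1) = patF s (m - 4) := by
          rw [winN_pat s (m + 1) (by omega), show m + 1 - 5 = m - 4 by omega]
        have hseq : seqF s (m + 1) = seqF s m ++ [(patF s (m - 4), priceF s m)] := by
          unfold seqF
          rw [show m + 1 - 4 = (m - 4) + 1 by omega, List.range_succ, List.map_append,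
            List.map_singleton, show m - 4 + 4 = m by omega]
        rw [hpat]
        unfold locN
        rw [hseq, List.foldl_append]
        simp
      · rw [if_neg (by exact_mod_cast hm)]
        unfold locN seqF
        rw [show m + 1 - 4 = m - 4 by omega]
    rw [hloc, hcur, hprice]
    simp

set_option maxRecDepth 16384 in
lemma stepEq (st : Int × PySem.Dict (List Int) Int) (s0 : Int) :
    (let pr := (List.range 2000).foldl (fun (acc : List Int × Int) _ =>
        let s' := mixPrune acc.2
        (acc.1 ++ [s'], s')) ([], s0)
     let nums := pr.1
     let part1 := st.1 + PySem.List.pyGetD nums (-1) 0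
     let diffs := (nums.zip nums.tail).map
        (fun ab => PySem.Int.mod ab.2 10 - PySem.Int.mod ab.1 10)
     let inner := (PySem.List.pyRange 0 ((nums.length : Int) - 4) 1).foldl
      (fun (bs : PySem.Dict (List Int) Int × PySem.Set (List Int)) i =>
        let pat := PySem.List.slice diffs (some i) (some (i + 4))
        if PySem.Set.contains bs.2 pat then bs
        else (bs.1.modify pat 0 (· + PySem.Int.mod (PySem.List.pyGetD nums (i + 4) 0) 10),
              PySem.Set.add bs.2 pat))
      (st.2, PySem.Set.empty)
     ((part1, inner.1) : Int × PySem.Dict (List Int) Int))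
    = (let r := (PySem.List.pyRange 0 2000 1).foldl
        (fun (q : Int × Int × List Int × PySem.Dict (List Int) Int) i =>
          let cur := mixPrune q.1
          let price := PySem.Int.mod cur 10
          let window := if i ≠ 0 then pushWin q.2.2.1 (price - q.2.1) else q.2.2.1
          let lcl := if 4 ≤ i then q.2.2.2.setdefault window price else q.2.2.2
          (cur, price, window, lcl))
        (s0, 0, [], PySem.Dict.empty)
       let part1 := st.1 + r.1
       let bananas := r.2.2.2.items.foldl (fun d kv => d.modify kv.1 0 (· + kv.2)) st.2
       (part1, bananas)) := by
  simp only []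
  rw [genA 2000 s0]
  have hB := Binv s0 2000
  rw [show ((2000 : Nat) : Int) = (2000 : Int) from by norm_num] at hB
  rw [hB]
  simp only []
  rw [lastA 2000 s0 (by norm_num)]
  rw [show numsL 2000 s0 = (List.range 2000).map (fun k => iterMP (k + 1) s0) from rfl]
  rw [zipTail (fun k => iterMP (k + 1) s0) 2000
      (fun ab => PySem.Int.mod ab.2 10 - PySem.Int.mod ab.1 10)]
  simp only [List.length_map, List.length_range]
  rw [show (fun k => PySem.Int.mod (iterMP (k + 1 + 1) s0) 10 -
        PySem.Int.mod (iterMP (k + 1) s0) 10) = diffF s0 from rfl]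
  rw [show ((2000 : Nat) : Int) - 4 = ((1996 : Nat) : Int) from by norm_num]
  rw [PySem.List.pyRange_zero_nat 1996, List.foldl_map]
  rw [show (2000 : Nat) - 1 = 1999 from rfl]
  have hcong : ∀ (acc : PySem.Dict (List Int) Int × PySem.Set (List Int)),
      ∀ k ∈ List.range 1996,
      (if acc.2.contains (PySem.List.slice ((List.range 1999).map (diffF s0))
            (some ((k : Nat) : Int)) (some (((k : Nat) : Int) + 4))) = true then acc
       else (acc.1.modify (PySem.List.slice ((List.range 1999).map (diffF s0))
            (some ((k : Nat) : Int)) (some (((k : Nat) : Int) + 4))) 0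
            (fun x => x + PySem.Int.mod (PySem.List.pyGetD
              ((List.range 2000).map (fun k => iterMP (k + 1) s0)) (((k : Nat) : Int) + 4) 0) 10),
            acc.2.add (PySem.List.slice ((List.range 1999).map (diffF s0))
            (some ((k : Nat) : Int)) (some (((k : Nat) : Int) + 4)))))
        = addStep acc (patF s0 k, priceF s0 (k + 4)) := by
    intro acc k hk
    simp only [List.mem_range] at hk
    rw [patSlice s0 1999 k (by omega), numsAt s0 2000 k (by omega)]
    rfl
  rw [PySem.List.foldl_congr_mem (List.range 1996) _
      (fun acc k => addStep acc (patF s0 k, priceF s0 (k + 4))) (st.2, PySem.Set.empty) hcong]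
  have hseq : seqF s0 2000 = (List.range 1996).map
      (fun k => (patF s0 k, priceF s0 (k + 4))) := by
    unfold seqF; norm_num
  rw [show List.foldl (fun acc k => addStep acc (patF s0 k, priceF s0 (k + 4)))
        (st.2, PySem.Set.empty) (List.range 1996)
      = List.foldl addStep (st.2, PySem.Set.empty)
        ((List.range 1996).map (fun k => (patF s0 k, priceF s0 (k + 4)))) from
      List.foldl_map.symm, ← hseq]
  rw [lemA (seqF s0 2000) st.2 PySem.Set.empty]
  rw [show locN s0 2000 = (seqF s0 2000).foldl
      (fun l (pv : List Int × Int) => l.setdefault pv.1 pv.2) PySem.Dict.empty from rfl]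
  rw [lemB (seqF s0 2000) PySem.Dict.empty PySem.Dict.nodup_keys_empty]
  rfl


-- ===== VERDICT (by name: the statement is the Claim_ definition above) =====
set_option maxRecDepth 16384 in
theorem solve_spec : Claim_equal_solve := by
  intro p _ _
  unfold Spec_solve solve solve_alt
  simp only []
  rw [PySem.List.foldl_congr_mem p _ _ ((0 : Int), (PySem.Dict.empty : PySem.Dict (List Int) Int))
      (fun acc x _ => stepEq acc x)]
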